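-- pv_equiv track=rewrite | github.com/somesh1312/HighPeak-Som | main.py | find_remaining_jobs
-- ===== SOURCE A (Python) =====
-- def find_remaining_jobs(jobs):
--     n = len(jobs)
--     jobs.sort(key=lambda x: x[1])  # sort by end time
--     selected_job = jobs[0]
--     remaining_jobs = []
--     total_earnings = 0
--     for i in range(1, n):
--         job = jobs[i]
--         if job[0] >= selected_job[1]:
--             # this job doesn't overlap with the selected job
--             total_earnings += selected_job[2]
--             selected_job = job
--         else:
--             remaining_jobs.append(job)
--     total_earnings += selected_job[2]
--     num_remaining_jobs = len(remaining_jobs)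
--     return [num_remaining_jobs, total_earnings]
-- ===== SOURCE B (Python) =====
-- def find_remaining_jobs(jobs):
--     # repeated min-extraction: no sort; pick the earliest-ending job, prune overlaps
--     pool = list(jobs)
--     count = 0
--     earnings = 0
--     while pool:
--         m = min(pool, key=lambda j: j[1])
--         count += 1
--         earnings += m[2]
--         pool.remove(m)
--         pool = [job for job in pool if job[0] >= m[1]]
--     return [len(jobs) - count, earnings]
-- ===== Notes on version B (the rewrite author's own statement) =====
-- stated objective: alternative
-- what changed: B never sorts: instead of A's sort-by-end-time followed by a single greedy scan that maintains a remaining list, B repeatedly extracts the earliest-ending job of the pool with min(), counts and cashes it, and prunes every overlapping job from the pool; it trades A's O(n log n) sort+scan for an O(n*k) selection loop and does not mutate the input list (A sorts it in place).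
-- outside the precondition, e.g. on find_remaining_jobs([[0, 3, 5], [1, 9]]): A returns [1, 5], B returns [1, 5]
-- crash fix: On the empty list A raises IndexError at jobs[0]; B naturally returns [0, 0] (no jobs left over, no earnings). — e.g. on find_remaining_jobs([]): A raises IndexError, B returns [0, 0]
import Mathlib
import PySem

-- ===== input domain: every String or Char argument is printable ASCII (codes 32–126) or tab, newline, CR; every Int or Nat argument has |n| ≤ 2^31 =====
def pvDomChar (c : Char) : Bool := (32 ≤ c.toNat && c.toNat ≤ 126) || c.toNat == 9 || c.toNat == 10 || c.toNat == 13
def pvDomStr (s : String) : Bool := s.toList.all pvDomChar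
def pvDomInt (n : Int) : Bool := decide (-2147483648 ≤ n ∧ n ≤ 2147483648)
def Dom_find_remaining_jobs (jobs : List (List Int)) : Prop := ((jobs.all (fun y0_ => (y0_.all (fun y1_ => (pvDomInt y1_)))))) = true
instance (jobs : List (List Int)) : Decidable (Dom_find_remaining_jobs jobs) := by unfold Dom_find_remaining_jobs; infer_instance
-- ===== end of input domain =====

-- B replaces sort-then-scan with repeated min-extraction (pick the earliest-ending job, prune
-- overlapping jobs) — a different algorithm of comparable practical cost; A sorts its argument
-- in place, B leaves it unchanged: the equivalence proved here is about the return value.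


-- ===== PORT A =====
-- loop body of A's for-loop over i in range(1, n); state = (selected_job, remaining_jobs, total_earnings)
def stepA (st : List Int × List (List Int) × Int) (job : List Int) : List Int × List (List Int) × Int :=
  if PySem.List.pyGetD job 0 0 ≥ PySem.List.pyGetD st.1 1 0 then
    (job, st.2.1, st.2.2 + PySem.List.pyGetD st.1 2 0)
  else
    (st.1, st.2.1 ++ [job], st.2.2)

def find_remaining_jobs (jobs : List (List Int)) : List Int :=
  let n : Int := (jobs.length : Int)
  let s := PySem.List.sorted jobs (fun x => PySem.List.pyGetD x 1 0)   -- jobs.sort(key=lambda x: x[1])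
  let selected_job := PySem.List.pyGetD s 0 []                          -- jobs[0]
  let st := (PySem.List.pyRange 1 n 1).foldl
      (fun st i => stepA st (PySem.List.pyGetD s i [])) (selected_job, ([], 0))
  [(st.2.1.length : Int), st.2.2 + PySem.List.pyGetD st.1 2 0]

-- ===== PORT B =====
-- while pool: m = min(pool, key=lambda j: j[1]); count += 1; earnings += m[2];
-- pool.remove(m); pool = [job for job in pool if job[0] >= m[1]].
-- fuel = len(jobs) only makes the recursion structural (the pool shrinks every iteration, so
-- fuel never runs out); the min?/remove? none-branches are the unreachable empty-pool /
-- ValueError cases.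
def loopB (fuel : Nat) (total : Int) (pool : List (List Int)) (count earnings : Int) : List Int :=
  match pool, fuel with
  | [], _ => [total - count, earnings]
  | _ :: _, 0 => [total - count, earnings]
  | p :: ps, fuel + 1 =>
    match PySem.List.min? (p :: ps) (fun j => PySem.List.pyGetD j 1 0) with
    | none => [total - count, earnings]
    | some m =>
      match PySem.List.remove? (p :: ps) m with
      | none => [total - count, earnings]
      | some pool' =>
        loopB fuel total
          (pool'.filter (fun job => decide (PySem.List.pyGetD job 0 0 ≥ PySem.List.pyGetD m 1 0)))
          (count + 1) (earnings + PySem.List.pyGetD m 2 0)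

def find_remaining_jobs_alt (jobs : List (List Int)) : List Int :=
  loopB jobs.length (jobs.length : Int) jobs 0 0

-- ===== PRECONDITION & SPEC =====
-- Pre_ restricts to the function's natural domain: a nonempty list of job triples [start, end, pay].
-- A raises IndexError on the empty list; on sublists shorter than 3 it raises on most inputs
-- (sort key x[1], selected_job[2]) — shorter sublists are excluded even where A happens to return.
def Pre_find_remaining_jobs (jobs : List (List Int)) : Prop :=
  jobs ≠ [] ∧ ∀ j ∈ jobs, 3 ≤ j.length
instance (jobs : List (List Int)) : Decidable (Pre_find_remaining_jobs jobs) := by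
  unfold Pre_find_remaining_jobs; infer_instance

def pvWitness_find_remaining_jobs : List (List Int) := [[1, 2, 5], [3, 4, 6]]

-- On the empty list A raises IndexError at jobs[0]; B naturally returns [0, 0].
def Raises_find_remaining_jobs (jobs : List (List Int)) : Prop := jobs = []
instance (jobs : List (List Int)) : Decidable (Raises_find_remaining_jobs jobs) := by
  unfold Raises_find_remaining_jobs; infer_instance
def pvRaiseWitness_find_remaining_jobs : List (List Int) := []
def pvRaiseWitnessOut_find_remaining_jobs : List Int := [0, 0]

def Spec_find_remaining_jobs (jobs : List (List Int)) (out : List Int) : Prop := out = find_remaining_jobs_alt jobs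
instance (jobs : List (List Int)) (out : List Int) : Decidable (Spec_find_remaining_jobs jobs out) := by unfold Spec_find_remaining_jobs; infer_instance

-- ===== CLAIM (what is proved, stated in full; the proofs are below) =====
def Claim_equal_find_remaining_jobs : Prop := ∀ (jobs : List (List Int)), Dom_find_remaining_jobs jobs → Pre_find_remaining_jobs jobs → Spec_find_remaining_jobs jobs (find_remaining_jobs jobs)

def Claim_raises_find_remaining_jobs : Prop := (∀ (jobs : List (List Int)), Dom_find_remaining_jobs jobs → Raises_find_remaining_jobs jobs → ¬ Pre_find_remaining_jobs jobs) ∧ (Dom_find_remaining_jobs (pvRaiseWitness_find_remaining_jobs) ∧ Raises_find_remaining_jobs (pvRaiseWitness_find_remaining_jobs) ∧ find_remaining_jobs_alt (pvRaiseWitness_find_remaining_jobs) = pvRaiseWitnessOut_find_remaining_jobs)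

-- ===== LEMMAS AND PROOFS =====

-- A's greedy continuation on the (sorted) tail: given the current selected job's end time e,
-- (number of further selected jobs, their total pay)
def greedyS : List (List Int) → Int → Int × Int
  | [], _ => (0, 0)
  | j :: t, e =>
    if PySem.List.pyGetD j 0 0 ≥ e then
      ((greedyS t (PySem.List.pyGetD j 1 0)).1 + 1,
       (greedyS t (PySem.List.pyGetD j 1 0)).2 + PySem.List.pyGetD j 2 0)
    else greedyS t e

-- B's recursion scheme on a SORTED pool: take the head, prune, recurse
def gAll : List (List Int) → Int × Int
  | [] => (0, 0)
  | h :: t =>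
    ((gAll (t.filter (fun j => decide (PySem.List.pyGetD j 0 0 ≥ PySem.List.pyGetD h 1 0)))).1 + 1,
     (gAll (t.filter (fun j => decide (PySem.List.pyGetD j 0 0 ≥ PySem.List.pyGetD h 1 0)))).2
       + PySem.List.pyGetD h 2 0)
termination_by l => l.length
decreasing_by simpa using Nat.lt_succ_of_le (by simpa using List.length_filter_le _ t.attach)

-- ---- stable-sort toolkit (insertion characterisation of PySem.List.sorted) ----

theorem sortApp {α : Type} (key : α → Int) (xs : List α) (x : α) :
    PySem.List.sorted (xs ++ [x]) key
      = PySem.List.insertBy (fun a b => decide (key a < key b)) x (PySem.List.sorted xs key) := by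
  rw [PySem.List.sorted_eq_foldl_insertBy, PySem.List.sorted_eq_foldl_insertBy, List.foldl_append]
  rfl

-- min(pool, key) (Python: the FIRST minimum) is the head of the stable sort of pool
theorem minHead {α : Type} (key : α → Int) (pool : List α) (h : α) (t : List α)
    (hs : PySem.List.sorted pool key = h :: t) :
    PySem.List.min? pool key = some h := by
  induction pool using List.reverseRecOn generalizing h t with
  | nil => rw [PySem.List.sorted_eq_foldl_insertBy] at hs; simp at hs
  | append_singleton xs x ih =>
    have hstep : PySem.List.min? (xs ++ [x]) key
        = match PySem.List.min? xs key with
          | none => some x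
          | some m => if key x < key m then some x else some m := by
      unfold PySem.List.min?
      rw [List.foldl_append]
      rfl
    rw [sortApp] at hs
    cases hsx : PySem.List.sorted xs key with
    | nil =>
      have hxs : xs = [] := (PySem.List.sorted_eq_nil_iff xs key false).mp hsx
      subst hxs
      rw [hsx] at hs
      have hins : PySem.List.insertBy (fun a b => decide (key a < key b)) x [] = [x] := rfl
      rw [hins] at hs
      injection hs with h1 _
      rw [hstep]
      exact congrArg some h1
    | cons h0 t0 =>
      have ihm := ih h0 t0 hsx
      rw [hsx] at hs
      have hins : PySem.List.insertBy (fun a b => decide (key a < key b)) x (h0 :: t0)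
          = if decide (key x < key h0) then x :: h0 :: t0
            else h0 :: PySem.List.insertBy (fun a b => decide (key a < key b)) x t0 := rfl
      rw [hins] at hs
      rw [hstep, ihm]
      show (if key x < key h0 then some x else some h0) = some h
      by_cases hlt : key x < key h0
      · rw [if_pos (by simpa using hlt)] at hs
        injection hs with h1 _
        rw [if_pos hlt]; exact congrArg some h1
      · rw [if_neg (by simpa using hlt)] at hs
        injection hs with h1 _
        rw [if_neg hlt]; exact congrArg some h1

-- erasing the head of the stable sort from the pool sorts to the tail
theorem eraseSorted {α : Type} [BEq α] [LawfulBEq α] (key : α → Int) (pool : List α) (h : α) (t : List α)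
    (hs : PySem.List.sorted pool key = h :: t) :
    PySem.List.sorted (pool.erase h) key = t := by
  induction pool using List.reverseRecOn generalizing h t with
  | nil => rw [PySem.List.sorted_eq_foldl_insertBy] at hs; simp at hs
  | append_singleton xs x ih =>
    rw [sortApp] at hs
    cases hsx : PySem.List.sorted xs key with
    | nil =>
      have hxs : xs = [] := (PySem.List.sorted_eq_nil_iff xs key false).mp hsx
      subst hxs
      rw [hsx] at hs
      have hins : PySem.List.insertBy (fun a b => decide (key a < key b)) x [] = [x] := rfl
      rw [hins] at hs
      injection hs with h1 h2
      subst h1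
      simp [← h2, hsx]
    | cons h0 t0 =>
      have hins : PySem.List.insertBy (fun a b => decide (key a < key b)) x (h0 :: t0)
          = if decide (key x < key h0) then x :: h0 :: t0
            else h0 :: PySem.List.insertBy (fun a b => decide (key a < key b)) x t0 := rfl
      rw [hsx, hins] at hs
      by_cases hlt : key x < key h0
      · rw [if_pos (by simpa using hlt)] at hs
        injection hs with h1 h2
        subst h1
        have hnx : x ∉ xs := by
          intro hmem
          exact absurd (PySem.List.key_head_sorted_le xs key hsx x hmem) (not_le.mpr hlt)
        rw [List.erase_append_right _ hnx]
        simp only [List.erase_cons_head, List.append_nil]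
        rw [hsx, h2]
      · rw [if_neg (by simpa using hlt)] at hs
        injection hs with h1 h2
        subst h1
        have hmem : h0 ∈ xs := by
          have : h0 ∈ PySem.List.sorted xs key := by rw [hsx]; exact List.mem_cons_self
          exact (PySem.List.mem_sorted xs key false h0).mp this
        rw [List.erase_append_left _ hmem, sortApp, ih h0 t0 hsx, h2]

theorem insertBy_filter {α : Type} (key : α → Int) (p : α → Bool) (x : α) :
    ∀ (l : List α), l.Pairwise (fun a b => key a ≤ key b) →
    (PySem.List.insertBy (fun a b => decide (key a < key b)) x l).filter p
      = if p x then PySem.List.insertBy (fun a b => decide (key a < key b)) x (l.filter p)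
        else l.filter p := by
  intro l
  induction l with
  | nil =>
    intro _
    by_cases hx : p x <;>
      simp [hx, show PySem.List.insertBy (fun a b => decide (key a < key b)) x [] = [x] from rfl]
  | cons y ys ih =>
    intro hp
    obtain ⟨hy, hys⟩ := List.pairwise_cons.mp hp
    rw [show PySem.List.insertBy (fun a b => decide (key a < key b)) x (y :: ys)
        = if decide (key x < key y) then x :: y :: ys
          else y :: PySem.List.insertBy (fun a b => decide (key a < key b)) x ys from rfl]
    by_cases hlt : key x < key y
    · rw [if_pos (by simpa using hlt)]
      by_cases hx : p x
      · have hhead : PySem.List.insertBy (fun a b => decide (key a < key b)) x ((y :: ys).filter p)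
            = x :: (y :: ys).filter p := by
          cases hf : (y :: ys).filter p with
          | nil => rfl
          | cons z zs =>
            have hz : z ∈ y :: ys := List.mem_of_mem_filter (hf ▸ List.mem_cons_self)
            have hxz : key x < key z := by
              rcases List.mem_cons.mp hz with rfl | hzys
              · exact hlt
              · exact lt_of_lt_of_le hlt (hy z hzys)
            rw [show PySem.List.insertBy (fun a b => decide (key a < key b)) x (z :: zs)
                = if decide (key x < key z) then x :: z :: zs
                  else z :: PySem.List.insertBy (fun a b => decide (key a < key b)) x zs from rfl]
            rw [if_pos (by simpa using hxz)]
        rw [if_pos hx, hhead, List.filter_cons, if_pos hx]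
      · rw [if_neg hx, List.filter_cons, if_neg hx]
    · rw [if_neg (by simpa using hlt)]
      rw [List.filter_cons]
      by_cases hyp : p y
      · rw [if_pos hyp, List.filter_cons, if_pos hyp, ih hys]
        by_cases hx : p x
        · rw [if_pos hx, if_pos hx]
          rw [show PySem.List.insertBy (fun a b => decide (key a < key b)) x (y :: ys.filter p)
              = if decide (key x < key y) then x :: y :: ys.filter p
                else y :: PySem.List.insertBy (fun a b => decide (key a < key b)) x (ys.filter p) from rfl]
          rw [if_neg (by simpa using hlt)]
        · rw [if_neg hx, if_neg hx]
      · rw [if_neg hyp, List.filter_cons, if_neg hyp, ih hys]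

-- stable sort commutes with filter
theorem sortFilter {α : Type} (key : α → Int) (xs : List α) (p : α → Bool) :
    PySem.List.sorted (xs.filter p) key = (PySem.List.sorted xs key).filter p := by
  induction xs using List.reverseRecOn with
  | nil => rfl
  | append_singleton xs x ih =>
    rw [List.filter_append, sortApp, insertBy_filter key p x _ (PySem.List.sorted_pairwise xs key),
        List.filter_cons]
    by_cases hx : p x
    · simp only [hx, if_pos, List.filter_nil]
      rw [sortApp, ih]
    · simp only [hx, List.filter_nil, List.append_nil, Bool.false_eq_true, if_false]
      exact ih

-- ---- greedy lemmas ----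

theorem greedyS_skip (t1 : List (List Int)) :
    ∀ (t2 : List (List Int)) (e : Int), (∀ j ∈ t1, ¬ PySem.List.pyGetD j 0 0 ≥ e) →
    greedyS (t1 ++ t2) e = greedyS t2 e := by
  induction t1 with
  | nil => intro t2 e _; rfl
  | cons j rest ih =>
    intro t2 e h
    have hj := h j List.mem_cons_self
    simp only [List.cons_append, greedyS, if_neg hj]
    exact ih t2 e (fun x hx => h x (List.mem_cons_of_mem _ hx))

theorem greedyS_none (t : List (List Int)) (e : Int)
    (h : ∀ j ∈ t, ¬ PySem.List.pyGetD j 0 0 ≥ e) : greedyS t e = (0, 0) := by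
  have := greedyS_skip t [] e h
  simpa using this

-- B's recursion scheme on a sorted list computes A's skip-based greedy
theorem gAll_eq_greedyS :
    ∀ (n : Nat) (t : List (List Int)), t.length ≤ n →
      t.Pairwise (fun a b => PySem.List.pyGetD a 1 0 ≤ PySem.List.pyGetD b 1 0) →
      ∀ (e : Int), (∀ j ∈ t, e ≤ PySem.List.pyGetD j 1 0) →
      gAll (t.filter (fun j => decide (PySem.List.pyGetD j 0 0 ≥ e))) = greedyS t e := by
  intro n
  induction n with
  | zero =>
    intro t hlen _ e _
    have : t = [] := List.eq_nil_of_length_eq_zero (Nat.le_zero.mp hlen)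
    subst this
    simp [gAll, greedyS]
  | succ n ih =>
    intro t hlen hp e he
    cases hf : t.filter (fun j => decide (PySem.List.pyGetD j 0 0 ≥ e)) with
    | nil =>
      have hno : ∀ j ∈ t, ¬ PySem.List.pyGetD j 0 0 ≥ e := by
        intro j hj
        have := List.filter_eq_nil_iff.mp hf j hj
        simpa using this
      rw [greedyS_none t e hno]
      simp [gAll]
    | cons j0 restf =>
      obtain ⟨t1, t2, ht, ht1, hj0, hrest⟩ := List.filter_eq_cons_iff.mp hf
      have hj0e : PySem.List.pyGetD j0 0 0 ≥ e := by simpa using hj0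
      have hkj0 : e ≤ PySem.List.pyGetD j0 1 0 := he j0 (by rw [ht]; exact List.mem_append_right _ List.mem_cons_self)
      -- facts about t2
      rw [ht] at hp
      have hp' := (List.pairwise_append.mp hp).2.1
      obtain ⟨he2, hp2⟩ := List.pairwise_cons.mp hp'
      have hlen2 : t2.length ≤ n := by
        have : t.length = t1.length + (t2.length + 1) := by rw [ht]; simp
        omega
      -- the inner filter collapses: elig at (end of j0) implies elig at e
      have hsub : restf.filter (fun j => decide (PySem.List.pyGetD j 0 0 ≥ PySem.List.pyGetD j0 1 0))
          = t2.filter (fun j => decide (PySem.List.pyGetD j 0 0 ≥ PySem.List.pyGetD j0 1 0)) := by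
        rw [← hrest, List.filter_filter]
        apply List.filter_congr
        intro x _
        by_cases hc : PySem.List.pyGetD x 0 0 ≥ PySem.List.pyGetD j0 1 0
        · have : PySem.List.pyGetD x 0 0 ≥ e := le_trans hkj0 hc
          simp [hc, this]
        · simp [hc]
      simp only [gAll]
      rw [hsub, ih t2 hlen2 hp2 (PySem.List.pyGetD j0 1 0) he2]
      rw [ht, greedyS_skip t1 (j0 :: t2) e (by intro j hj; simpa using ht1 j hj)]
      simp only [greedyS, if_pos hj0e]

-- B's loop computes gAll of the sorted pool
theorem loopB_eq :
    ∀ (n : Nat) (pool : List (List Int)), pool.length ≤ n → ∀ (total count earnings : Int),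
      loopB n total pool count earnings
        = [total - (count + (gAll (PySem.List.sorted pool (fun j => PySem.List.pyGetD j 1 0))).1),
           earnings + (gAll (PySem.List.sorted pool (fun j => PySem.List.pyGetD j 1 0))).2] := by
  intro n
  induction n with
  | zero =>
    intro pool hlen total c e
    have : pool = [] := List.eq_nil_of_length_eq_zero (Nat.le_zero.mp hlen)
    subst this
    show [total - c, e] = _
    rw [show PySem.List.sorted ([] : List (List Int)) (fun j => PySem.List.pyGetD j 1 0) = [] from rfl]
    simp [gAll]
  | succ n ih =>
    intro pool hlen total c e
    cases pool with
    | nil =>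
      show [total - c, e] = _
      rw [show PySem.List.sorted ([] : List (List Int)) (fun j => PySem.List.pyGetD j 1 0) = [] from rfl]
      simp [gAll]
    | cons p ps =>
      have hne : PySem.List.sorted (p :: ps) (fun j => PySem.List.pyGetD j 1 0) ≠ [] := by
        rw [Ne, PySem.List.sorted_eq_nil_iff]; simp
      obtain ⟨h, t, hs⟩ := List.exists_cons_of_ne_nil hne
      have hmem : h ∈ p :: ps := by
        have : h ∈ PySem.List.sorted (p :: ps) (fun j => PySem.List.pyGetD j 1 0) := by
          rw [hs]; exact List.mem_cons_self
        exact (PySem.List.mem_sorted _ _ false h).mp this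
      have hlen' : (((p :: ps).erase h).filter
          (fun job => decide (PySem.List.pyGetD job 0 0 ≥ PySem.List.pyGetD h 1 0))).length ≤ n := by
        have h1 := List.length_filter_le
          (fun job => decide (PySem.List.pyGetD job 0 0 ≥ PySem.List.pyGetD h 1 0)) ((p :: ps).erase h)
        have h2 := List.length_erase_of_mem hmem
        simp only [List.length_cons] at h2 hlen
        omega
      simp only [loopB, minHead _ (p :: ps) h t hs, PySem.List.remove?_eq_some_erase _ h hmem]
      rw [ih _ hlen' total (c + 1) (e + PySem.List.pyGetD h 2 0)]
      rw [sortFilter, eraseSorted _ (p :: ps) h t hs, hs]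
      simp only [gAll, List.cons.injEq, and_true]
      constructor <;> ring
-- A's fold over the sorted tail, characterised by greedyS
theorem stepA_fold :
    ∀ (t : List (List Int)) (sel : List Int) (rem : List (List Int)) (tot : Int),
      (((t.foldl stepA (sel, rem, tot)).2.1.length : Int)
          = (rem.length : Int) + (t.length : Int)
            - (greedyS t (PySem.List.pyGetD sel 1 0)).1)
      ∧ ((t.foldl stepA (sel, rem, tot)).2.2
            + PySem.List.pyGetD (t.foldl stepA (sel, rem, tot)).1 2 0
          = tot + PySem.List.pyGetD sel 2 0 + (greedyS t (PySem.List.pyGetD sel 1 0)).2) := by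
  intro t
  induction t with
  | nil => intro sel rem tot; simp [greedyS]
  | cons j rest ih =>
    intro sel rem tot
    simp only [List.foldl_cons, stepA]
    by_cases hc : PySem.List.pyGetD j 0 0 ≥ PySem.List.pyGetD sel 1 0
    · rw [if_pos hc]
      obtain ⟨ih1, ih2⟩ := ih j rem (tot + PySem.List.pyGetD sel 2 0)
      simp only [greedyS, if_pos hc]
      constructor
      · rw [ih1]; simp only [List.length_cons]; push_cast; ring
      · rw [ih2]; ring
    · rw [if_neg hc]
      obtain ⟨ih1, ih2⟩ := ih sel (rem ++ [j]) tot
      simp only [greedyS, if_neg hc]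
      constructor
      · rw [ih1]; simp only [List.length_cons, List.length_append, List.length_nil]; push_cast; ring
      · exact ih2

-- ===== VERDICT (by name: the statement is the Claim_ definition above) =====
theorem find_remaining_jobs_spec : Claim_equal_find_remaining_jobs := by
  intro jobs _ hpre
  obtain ⟨hne, _⟩ := hpre
  unfold Spec_find_remaining_jobs find_remaining_jobs find_remaining_jobs_alt
  have hsne : PySem.List.sorted jobs (fun x => PySem.List.pyGetD x 1 0) ≠ [] := by
    rw [Ne, PySem.List.sorted_eq_nil_iff]; exact hne
  obtain ⟨h, t, hs⟩ := List.exists_cons_of_ne_nil hsne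
  have hslen : (PySem.List.sorted jobs (fun x => PySem.List.pyGetD x 1 0)).length = jobs.length :=
    PySem.List.length_sorted ..
  have hlen : (jobs.length : Int) = ((PySem.List.sorted jobs (fun x => PySem.List.pyGetD x 1 0)).length : Int) := by
    rw [hslen]
  have hpw := PySem.List.sorted_pairwise jobs (fun x => PySem.List.pyGetD x 1 0)
  rw [hs] at hpw
  obtain ⟨hhd, htl⟩ := List.pairwise_cons.mp hpw
  have hg : gAll (h :: t)
      = ((greedyS t (PySem.List.pyGetD h 1 0)).1 + 1,
         (greedyS t (PySem.List.pyGetD h 1 0)).2 + PySem.List.pyGetD h 2 0) := by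
    simp only [gAll]
    rw [gAll_eq_greedyS t.length t (le_refl _) htl (PySem.List.pyGetD h 1 0) hhd]
  -- B side
  rw [loopB_eq jobs.length jobs (le_refl _) ((jobs.length : Nat) : Int) 0 0, hs, hg]
  -- A side
  rw [hlen, hs]
  dsimp only
  rw [PySem.List.foldl_pyRange_pyGetD' (h :: t) [] stepA
      (PySem.List.pyGetD (h :: t) 0 [], ([], 0)) (a := 1) (by omega)]
  simp only [PySem.List.pyGetD_zero_cons, Int.toNat_one, List.drop_succ_cons, List.drop_zero]
  obtain ⟨ha1, ha2⟩ := stepA_fold t h [] 0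
  rw [List.cons.injEq]
  constructor
  · rw [ha1]
    simp only [List.length_nil, List.length_cons, Nat.cast_zero]
    push_cast
    ring
  · rw [List.cons.injEq]
    refine ⟨?_, rfl⟩
    rw [ha2]
    ring

def find_remaining_jobs_raises : Claim_raises_find_remaining_jobs := by
  unfold Claim_raises_find_remaining_jobs
  constructor
  · intro jobs _ hr hp
    exact hp.1 hr
  · exact ⟨by decide, by decide, by decide⟩
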